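-- pv_equiv track=rewrite | github.com/deep-in-the-pc/GoogleHash2019 | main.py | shapesOfN
-- ===== SOURCE A (Python) =====
-- def shapesOfN(n):
--     #Shapes are stores in (Row, Column) format
--     shapes = list()
--     tempShapes = list()
--     shapes.append((1, n)) # Basic shapes
--     shapes.append((n, 1)) # Vertical and Horizontal Line
--
--     if n%2==0:
--         for i in range(2, n, 2):
--             for o in range(1, n):
--                 if i*o<=n:
--                     tempShapes.append((i, o))
--                     tempShapes.append((o, i))
--     else:
--         for i in range(2, n-1, 2):
--             for o in range(1, n-1):
--                 if i*o<=n: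
--                     tempShapes.append((i, o))
--                     if(i != o):
--                         tempShapes.append((o, i))
--
--     #ordering shapes by maximum area
--
--     for i in reversed(tempShapes):
--         shapes.append(i)
--
--     return shapes
-- ===== SOURCE B (Python) =====
-- def shapesOfN(n):
--     # Generates the tail as one comprehension over divisor-bounded descending
--     # ranges (o up to n // i), so there is no per-pair area test, no mutation
--     # and no reversal pass; pairs come out directly in A's final order.
--     if n % 2 == 0:
--         tail = [p
--                 for i in range(n - 2, 1, -2)
--                 for o in range(n // i, 0, -1)
--                 for p in ((o, i), (i, o))]
--     else:
--         tail = [p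
--                 for i in range(n - 3, 1, -2)
--                 for o in range(n // i, 0, -1)
--                 for p in (((o, i), (i, o)) if i != o else ((i, o),))]
--     return [(1, n), (n, 1)] + tail
-- ===== Notes on version B (the rewrite author's own statement) =====
-- stated objective: faster
-- what changed: B replaces A's nested mutating loops (full scan over o with an i*o<=n test, then a reversal pass) by a single comprehension over divisor-bounded descending ranges (o runs only up to n//i), emitting the pairs directly in A's final order.
import Mathlib
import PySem

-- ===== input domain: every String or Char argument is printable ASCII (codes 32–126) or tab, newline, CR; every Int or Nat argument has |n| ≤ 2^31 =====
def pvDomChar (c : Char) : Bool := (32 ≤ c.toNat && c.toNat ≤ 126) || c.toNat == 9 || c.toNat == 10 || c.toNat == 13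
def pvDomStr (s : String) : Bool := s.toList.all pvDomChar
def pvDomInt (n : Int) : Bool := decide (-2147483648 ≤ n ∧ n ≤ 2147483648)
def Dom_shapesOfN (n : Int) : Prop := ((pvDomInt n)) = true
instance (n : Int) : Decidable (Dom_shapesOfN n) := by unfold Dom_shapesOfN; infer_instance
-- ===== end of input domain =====

-- B generates the tail as one comprehension over divisor-bounded descending ranges
-- (o only up to n // i), with no area test, no mutation and no reversal pass
-- (measured faster: asymptotic change).

-- ===== PORT A =====
def shapesOfN (n : Int) : List (List Int) :=
  -- shapes = [(1, n), (n, 1)]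
  let shapes : List (List Int) := [[1, n], [n, 1]]
  let tempShapes : List (List Int) :=
    if PySem.Int.mod n 2 == 0 then
      (PySem.List.pyRange 2 n 2).foldl (fun acc i =>
        (PySem.List.pyRange 1 n 1).foldl (fun acc2 o =>
          if i * o ≤ n then acc2 ++ [[i, o]] ++ [[o, i]] else acc2) acc) []
    else
      (PySem.List.pyRange 2 (n - 1) 2).foldl (fun acc i =>
        (PySem.List.pyRange 1 (n - 1) 1).foldl (fun acc2 o =>
          if i * o ≤ n then
            (acc2 ++ [[i, o]]) ++ (if i ≠ o then [[o, i]] else [])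
          else acc2) acc) []
  -- for i in reversed(tempShapes): shapes.append(i)
  tempShapes.reverse.foldl (fun acc x => acc ++ [x]) shapes

-- ===== PORT B =====
def shapesOfN_alt (n : Int) : List (List Int) :=
  let tail : List (List Int) :=
    if PySem.Int.mod n 2 == 0 then
      (PySem.List.pyRange (n - 2) 1 (-2)).flatMap (fun i =>
        (PySem.List.pyRange (PySem.Int.floordiv n i) 0 (-1)).flatMap (fun o =>
          [[o, i], [i, o]]))
    else
      (PySem.List.pyRange (n - 3) 1 (-2)).flatMap (fun i =>
        (PySem.List.pyRange (PySem.Int.floordiv n i) 0 (-1)).flatMap (fun o =>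
          if i ≠ o then [[o, i], [i, o]] else [[i, o]]))
  [[1, n], [n, 1]] ++ tail

-- ===== PRECONDITION & SPEC =====
def Spec_shapesOfN (n : Int) (out : List (List Int)) : Prop := out = shapesOfN_alt n
instance (n : Int) (out : List (List Int)) : Decidable (Spec_shapesOfN n out) := by unfold Spec_shapesOfN; infer_instance

-- ===== CLAIM (what is proved, stated in full; the proofs are below) =====
def Claim_equal_shapesOfN : Prop := ∀ (n : Int), Dom_shapesOfN n → Spec_shapesOfN n (shapesOfN n)

-- ===== LEMMAS AND PROOFS =====

-- reversing an ascending step-2 range gives the matching descending step-2 range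
-- (no PySem lemma covers step -2, so this is proved from pyRange's definition)
theorem pv_rev_range2 (a b : Int) (h : (2:Int) ∣ b - a) :
    (PySem.List.pyRange a b 2).reverse = PySem.List.pyRange (b - 2) (a - 1) (-2) := by
  obtain ⟨m, hm⟩ := h
  by_cases hpos : 0 < m
  · have hab : a < b := by omega
    have hba : a - 1 < b - 2 := by omega
    simp only [PySem.List.pyRange]
    norm_num [hab, hba]
    have hc1 : ((b - a + 2 - 1) / 2).toNat = m.toNat := by omega
    have hc2 : ((b - 2 - (a - 1) + 2 - 1) / 2).toNat = m.toNat := by omega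
    rw [hc1, hc2]
    apply List.ext_getElem
    · simp
    · intro k h1 h2
      simp only [List.getElem_reverse, List.length_map, List.length_range,
        List.getElem_map, List.getElem_range]
      have hk : k < m.toNat := by simpa using h1
      omega
  · have hab : ¬ a < b := by omega
    have hba : ¬ a - 1 < b - 2 := by omega
    simp only [PySem.List.pyRange]
    norm_num [hab, hba]

theorem pv_inner_even (n i : Int) (h2 : 2 ≤ i) (hin : i < n) :
    ((PySem.List.pyRange 1 n 1).flatMap
        (fun o => if i * o ≤ n then [[i, o], [o, i]] else [])).reverse
      = (PySem.List.pyRange (PySem.Int.floordiv n i) 0 (-1)).flatMap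
          (fun o => ([[o, i], [i, o]] : List (List Int))) := by
  set m := PySem.Int.floordiv n i with hm
  have hi : (0:Int) < i := by omega
  have hm1 : 1 ≤ m := (PySem.Int.le_floordiv_iff_mul_le hi).mpr (by omega)
  have hmul : m * i ≤ n := (PySem.Int.le_floordiv_iff_mul_le hi).mp le_rfl
  have h2m : 2 * m ≤ n := by nlinarith
  have hcond : ∀ o : Int, (i * o ≤ n) ↔ o ≤ m := by
    intro o; rw [mul_comm]; exact (PySem.Int.le_floordiv_iff_mul_le hi).symm
  rw [PySem.List.pyRange_one_append 1 (m + 1) n (by omega) (by omega), List.flatMap_append]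
  have hnil : (PySem.List.pyRange (m + 1) n 1).flatMap
      (fun o => if i * o ≤ n then ([[i, o], [o, i]] : List (List Int)) else []) = [] := by
    rw [List.flatMap_eq_nil_iff]; intro o ho
    rw [PySem.List.mem_pyRange_one] at ho
    have hno : ¬ i * o ≤ n := by rw [hcond]; omega
    simp [hno]
  have hall : (PySem.List.pyRange 1 (m + 1) 1).flatMap
      (fun o => if i * o ≤ n then ([[i, o], [o, i]] : List (List Int)) else [])
      = (PySem.List.pyRange 1 (m + 1) 1).flatMap (fun o => [[i, o], [o, i]]) := by
    apply List.flatMap_congr; intro o ho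
    rw [PySem.List.mem_pyRange_one] at ho
    have hyes : i * o ≤ n := by rw [hcond]; omega
    simp [hyes]
  rw [hnil, hall, List.append_nil, PySem.List.pyRange_neg_one_eq_reverse]
  norm_num
  rw [List.reverse_flatMap]
  rfl

theorem pv_inner_odd (n i : Int) (h2 : 2 ≤ i) (hin : i < n - 1) :
    ((PySem.List.pyRange 1 (n - 1) 1).flatMap
        (fun o => if i * o ≤ n then [[i, o]] ++ (if i ≠ o then [[o, i]] else []) else [])).reverse
      = (PySem.List.pyRange (PySem.Int.floordiv n i) 0 (-1)).flatMap
          (fun o => if i ≠ o then ([[o, i], [i, o]] : List (List Int)) else [[i, o]]) := by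
  set m := PySem.Int.floordiv n i with hm
  have hi : (0:Int) < i := by omega
  have hm1 : 1 ≤ m := (PySem.Int.le_floordiv_iff_mul_le hi).mpr (by omega)
  have hmul : m * i ≤ n := (PySem.Int.le_floordiv_iff_mul_le hi).mp le_rfl
  have h2m : 2 * m ≤ n := by nlinarith
  have hcond : ∀ o : Int, (i * o ≤ n) ↔ o ≤ m := by
    intro o; rw [mul_comm]; exact (PySem.Int.le_floordiv_iff_mul_le hi).symm
  rw [PySem.List.pyRange_one_append 1 (m + 1) (n - 1) (by omega) (by omega), List.flatMap_append]
  have hnil : (PySem.List.pyRange (m + 1) (n - 1) 1).flatMap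
      (fun o => if i * o ≤ n then ([[i, o]] : List (List Int)) ++ (if i ≠ o then [[o, i]] else []) else []) = [] := by
    rw [List.flatMap_eq_nil_iff]; intro o ho
    rw [PySem.List.mem_pyRange_one] at ho
    have hno : ¬ i * o ≤ n := by rw [hcond]; omega
    simp [hno]
  have hall : (PySem.List.pyRange 1 (m + 1) 1).flatMap
      (fun o => if i * o ≤ n then ([[i, o]] : List (List Int)) ++ (if i ≠ o then [[o, i]] else []) else [])
      = (PySem.List.pyRange 1 (m + 1) 1).flatMap
          (fun o => ([[i, o]] : List (List Int)) ++ (if i ≠ o then [[o, i]] else [])) := by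
    apply List.flatMap_congr; intro o ho
    rw [PySem.List.mem_pyRange_one] at ho
    have hyes : i * o ≤ n := by rw [hcond]; omega
    simp [hyes]
  rw [hnil, hall, List.append_nil, PySem.List.pyRange_neg_one_eq_reverse]
  norm_num
  rw [List.reverse_flatMap]
  apply List.flatMap_congr; intro o _
  by_cases hio : i = o <;> simp [hio]

-- the two programs agree on every input
theorem pv_agree (n : Int) : shapesOfN n = shapesOfN_alt n := by
  unfold shapesOfN shapesOfN_alt
  by_cases h : PySem.Int.mod n 2 = 0
  · -- even branch
    have hdvd : (2:Int) ∣ n := (PySem.Int.mod_eq_zero_iff_dvd n 2).mp h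
    rw [if_pos (by simpa using h), if_pos (by simpa using h)]
    have hinnerA : (fun (acc : List (List Int)) i =>
        (PySem.List.pyRange 1 n 1).foldl (fun acc2 o =>
          if i * o ≤ n then acc2 ++ [[i, o]] ++ [[o, i]] else acc2) acc)
        = fun acc i => acc ++ (PySem.List.pyRange 1 n 1).flatMap
            (fun o => if i * o ≤ n then [[i, o], [o, i]] else []) := by
      funext acc i
      have hb : (fun (acc2 : List (List Int)) o =>
          if i * o ≤ n then acc2 ++ [[i, o]] ++ [[o, i]] else acc2)
          = fun acc2 o => acc2 ++ (if i * o ≤ n then [[i, o], [o, i]] else []) := by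
        funext acc2 o; split <;> simp
      rw [hb, PySem.List.foldl_append_eq_flatMap]
    rw [hinnerA, PySem.List.foldl_append_singleton_eq_self,
      PySem.List.foldl_append_eq_flatMap]
    simp only [List.nil_append]
    congr 1
    rw [List.reverse_flatMap]
    have : (PySem.List.pyRange 2 n 2).reverse.flatMap
        (List.reverse ∘ fun i => (PySem.List.pyRange 1 n 1).flatMap
          (fun o => if i * o ≤ n then [[i, o], [o, i]] else []))
        = (PySem.List.pyRange 2 n 2).reverse.flatMap
          (fun i => (PySem.List.pyRange (PySem.Int.floordiv n i) 0 (-1)).flatMap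
            (fun o => [[o, i], [i, o]])) := by
      apply List.flatMap_congr; intro i hi
      rw [List.mem_reverse, PySem.List.mem_pyRange_iff_of_pos (by norm_num)] at hi
      exact pv_inner_even n i (by omega) (by omega)
    rw [this, pv_rev_range2 2 n (by omega)]
    norm_num
  · -- odd branch
    have hndvd : ¬ (2:Int) ∣ n := fun hd => h ((PySem.Int.mod_eq_zero_iff_dvd n 2).mpr hd)
    rw [if_neg (by simpa using h), if_neg (by simpa using h)]
    have hinnerA : (fun (acc : List (List Int)) i =>
        (PySem.List.pyRange 1 (n - 1) 1).foldl (fun acc2 o =>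
          if i * o ≤ n then (acc2 ++ [[i, o]]) ++ (if i ≠ o then [[o, i]] else []) else acc2) acc)
        = fun acc i => acc ++ (PySem.List.pyRange 1 (n - 1) 1).flatMap
            (fun o => if i * o ≤ n then [[i, o]] ++ (if i ≠ o then [[o, i]] else []) else []) := by
      funext acc i
      have hb : (fun (acc2 : List (List Int)) o =>
          if i * o ≤ n then (acc2 ++ [[i, o]]) ++ (if i ≠ o then [[o, i]] else []) else acc2)
          = fun acc2 o => acc2 ++ (if i * o ≤ n then [[i, o]] ++ (if i ≠ o then [[o, i]] else []) else []) := by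
        funext acc2 o; split <;> simp
      rw [hb, PySem.List.foldl_append_eq_flatMap]
    rw [hinnerA, PySem.List.foldl_append_singleton_eq_self,
      PySem.List.foldl_append_eq_flatMap]
    simp only [List.nil_append]
    congr 1
    rw [List.reverse_flatMap]
    have : (PySem.List.pyRange 2 (n - 1) 2).reverse.flatMap
        (List.reverse ∘ fun i => (PySem.List.pyRange 1 (n - 1) 1).flatMap
          (fun o => if i * o ≤ n then [[i, o]] ++ (if i ≠ o then [[o, i]] else []) else []))
        = (PySem.List.pyRange 2 (n - 1) 2).reverse.flatMap
          (fun i => (PySem.List.pyRange (PySem.Int.floordiv n i) 0 (-1)).flatMap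
            (fun o => if i ≠ o then [[o, i], [i, o]] else [[i, o]])) := by
      apply List.flatMap_congr; intro i hi
      rw [List.mem_reverse, PySem.List.mem_pyRange_iff_of_pos (by norm_num)] at hi
      exact pv_inner_odd n i (by omega) (by omega)
    rw [this, pv_rev_range2 2 (n - 1) (by omega)]
    norm_num [show n - 1 - 2 = n - 3 from by ring]

-- ===== VERDICT (by name: the statement is the Claim_ definition above) =====
theorem shapesOfN_spec : Claim_equal_shapesOfN := by
  intro n _
  unfold Spec_shapesOfN
  exact pv_agree n
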